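-- pv_equiv track=rewrite | github.com/olppaemi/algo | Problem_Solving_Paradigms/Dynamic_Programming/UVa_507_Jill_Rides_Again.py | solution
-- ===== SOURCE A (Python) =====
-- def solution(nice):
--     s, mx = -1, 0
--     start, final_start, final_end = -1, -1, -1
--
--     for i in range(1, len(nice)):
--         if s >= 0:
--             s += nice[i]
--         else:  # if s < 0, reset
--             s = nice[i]
--             start = i
--
--         if s > mx or (s == mx and i + 1 - start > final_end - final_start):
--             mx = s
--             final_start = start
--             final_end = i + 1
--
--     return (final_start, final_end) if mx > 0 else (-1, -1)
-- ===== SOURCE B (Python) =====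
-- def solution(nice):
--     # Stage 1: walk prefix sums, recording one candidate segment (sum, start, end)
--     # per end position, derived from the earliest minimum prefix seen so far.
--     cands = []
--     p = minp = minidx = 0
--     for i, v in enumerate(nice[1:], start=1):
--         p += v
--         cands.append((p - minp, minidx + 1, i + 1))
--         if p < minp:
--             minp, minidx = p, i
--     # Stage 2: reduce the candidate list under the max-sum / longer-on-tie order.
--     mx, fs, fe = 0, -1, -1
--     for s, a, b in cands:
--         if s > mx or (s == mx and b - a > fe - fs):
--             mx, fs, fe = s, a, b
--     return (fs, fe) if mx > 0 else (-1, -1)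
-- ===== Notes on version B (the rewrite author's own statement) =====
-- stated objective: alternative
-- what changed: Replaces Kadane's single-pass running-sum-with-reset by two staged passes: first materialise, via prefix sums and the earliest minimum prefix, one candidate segment per end position, then reduce that candidate list under the max-sum/longer-on-tie order.
import Mathlib
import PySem

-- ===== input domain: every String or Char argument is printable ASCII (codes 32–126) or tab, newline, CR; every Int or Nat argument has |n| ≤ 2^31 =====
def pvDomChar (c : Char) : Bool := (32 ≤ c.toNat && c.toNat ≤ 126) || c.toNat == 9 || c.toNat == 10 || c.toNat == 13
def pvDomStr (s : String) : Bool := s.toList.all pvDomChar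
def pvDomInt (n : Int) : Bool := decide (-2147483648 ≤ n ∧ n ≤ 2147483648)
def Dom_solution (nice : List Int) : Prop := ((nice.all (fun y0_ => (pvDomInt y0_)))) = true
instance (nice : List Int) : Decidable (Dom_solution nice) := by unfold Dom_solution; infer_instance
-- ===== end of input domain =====

-- B replaces Kadane's single-pass running-sum-with-reset by two staged passes:
-- a prefix-sum pass materialising one candidate segment per end position, then
-- a reduction of that list (objective: alternative decomposition, same O(n) cost).

-- ===== PORT A =====
-- Kadane with reset; loop over range(1, len(nice)), state (s, mx, start, final_start, final_end).
def solutionLoopA (nice : List Int) (idxs : List Int)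
    (s mx start fs fe : Int) : Int × Int × Int :=
  match idxs with
  | [] => (mx, fs, fe)
  | i :: rest =>
    let s' := if s ≥ 0 then s + PySem.List.pyGetD nice i 0 else PySem.List.pyGetD nice i 0
    let start' := if s ≥ 0 then start else i
    if s' > mx ∨ (s' = mx ∧ i + 1 - start' > fe - fs) then
      solutionLoopA nice rest s' s' start' start' (i + 1)
    else
      solutionLoopA nice rest s' mx start' fs fe

def solution (nice : List Int) : Int × Int :=
  let r := solutionLoopA nice (PySem.List.pyRange 1 (nice.length : Int) 1) (-1) 0 (-1) (-1) (-1)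
  if r.1 > 0 then (r.2.1, r.2.2) else (-1, -1)

-- ===== PORT B =====
-- Stage 1: structural recursion over nice[1:] producing a candidate (sum, start, end)
-- for every end position, using prefix sum p and the earliest minimum prefix (minp, minidx).
def buildCands (l : List Int) (i p minp minidx : Int) : List (Int × Int × Int) :=
  match l with
  | [] => []
  | v :: rest =>
    (p + v - minp, minidx + 1, i + 1) ::
      (if p + v < minp then buildCands rest (i + 1) (p + v) (p + v) i
       else buildCands rest (i + 1) (p + v) minp minidx)

-- Stage 2: reduce the candidate list under max-sum / longer-on-tie.
def reduceCands (cs : List (Int × Int × Int)) (mx fs fe : Int) : Int × Int × Int :=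
  match cs with
  | [] => (mx, fs, fe)
  | (s, a, b) :: rest =>
    if s > mx ∨ (s = mx ∧ b - a > fe - fs) then reduceCands rest s a b
    else reduceCands rest mx fs fe

def solution_alt (nice : List Int) : Int × Int :=
  let r := reduceCands (buildCands (nice.drop 1) 1 0 0 0) 0 (-1) (-1)
  if r.1 > 0 then (r.2.1, r.2.2) else (-1, -1)

-- ===== PRECONDITION & SPEC =====
def Spec_solution (nice : List Int) (out : Int × Int) : Prop := out = solution_alt nice
instance (nice : List Int) (out : Int × Int) : Decidable (Spec_solution nice out) := by unfold Spec_solution; infer_instance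

-- ===== CLAIM =====
def Claim_equal_solution : Prop := ∀ (nice : List Int), Dom_solution nice → Spec_solution nice (solution nice)

-- ===== LEMMAS AND PROOFS =====

-- Invariant: l is the suffix nice.drop i0.toNat; A's (s, start) relate to B's (p, minp, minidx)
-- by s = p - minp ∧ start = minidx + 1 when s ≥ 0, and minp = p ∧ minidx = i0 - 1 right after a reset.
theorem loopA_eq_reduce_build (nice : List Int) :
    ∀ (l : List Int) (i0 s mx start fs fe p minp minidx : Int),
      1 ≤ i0 → 0 ≤ mx → nice.drop i0.toNat = l →
      (if s ≥ 0 then s = p - minp ∧ start = minidx + 1 else minp = p ∧ minidx = i0 - 1) →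
      solutionLoopA nice (PySem.List.pyRange i0 (nice.length : Int) 1) s mx start fs fe
        = reduceCands (buildCands l i0 p minp minidx) mx fs fe := by
  intro l
  induction l with
  | nil =>
    intro i0 s mx start fs fe p minp minidx hi0 _ hdrop _
    have hlen : (nice.length : Int) ≤ i0 := by
      have := List.drop_eq_nil_iff.mp hdrop
      omega
    rw [PySem.List.pyRange_one_eq_nil hlen]
    simp only [solutionLoopA, buildCands, reduceCands]
  | cons v rest ih =>
    intro i0 s mx start fs fe p minp minidx hi0 hmx hdrop hinv
    have hlt : i0.toNat < nice.length := by
      by_contra h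
      rw [List.drop_eq_nil_of_le (by omega)] at hdrop
      simp at hdrop
    have hiL : i0 < (nice.length : Int) := by omega
    rw [PySem.List.pyRange_one_cons hiL]
    have hget : PySem.List.pyGetD nice i0 0 = v := by
      have hcast : ((i0.toNat : Nat) : Int) = i0 := by omega
      rw [← hcast, PySem.List.pyGetD_natCast]
      have h1 : nice[i0.toNat]? = some v := by
        have h2 : (nice.drop i0.toNat)[0]? = nice[i0.toNat + 0]? := List.getElem?_drop
        rw [hdrop] at h2
        simpa using h2.symm
      simp [List.getD_eq_getElem?_getD, h1]
    simp only [solutionLoopA, buildCands, reduceCands, hget]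
    have hsA : (if s ≥ 0 then s + v else v) = p + v - minp := by
      split_ifs at hinv ⊢ with h <;> omega
    have hstA : (if s ≥ 0 then start else i0) = minidx + 1 := by
      split_ifs at hinv ⊢ with h <;> omega
    rw [hsA, hstA]
    have hdrop' : nice.drop (i0 + 1).toNat = rest := by
      have : (i0 + 1).toNat = i0.toNat + 1 := by omega
      rw [this, ← List.drop_drop, hdrop]
      rfl
    by_cases hc : p + v - minp > mx ∨ (p + v - minp = mx ∧ i0 + 1 - (minidx + 1) > fe - fs)
    · simp only [if_pos hc]
      by_cases hp : p + v < minp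
      · rw [if_pos hp]
        exact ih (i0 + 1) (p + v - minp) (p + v - minp) (minidx + 1) (minidx + 1) (i0 + 1)
          (p + v) (p + v) i0 (by omega) (by omega) hdrop' (by rw [if_pos (by omega)]; exact ⟨by omega, by omega⟩)
      · rw [if_neg hp]
        exact ih (i0 + 1) (p + v - minp) (p + v - minp) (minidx + 1) (minidx + 1) (i0 + 1)
          (p + v) minp minidx (by omega) (by omega) hdrop' (by rw [if_pos (by omega)]; exact ⟨by omega, by omega⟩)
    · simp only [if_neg hc]
      by_cases hp : p + v < minp
      · rw [if_pos hp]
        exact ih (i0 + 1) (p + v - minp) mx (minidx + 1) fs fe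
          (p + v) (p + v) i0 (by omega) (by omega) hdrop'
          (by by_cases hnn : p + v - minp ≥ 0
              · rw [if_pos hnn]; omega
              · rw [if_neg hnn]; exact ⟨rfl, by omega⟩)
      · rw [if_neg hp]
        exact ih (i0 + 1) (p + v - minp) mx (minidx + 1) fs fe
          (p + v) minp minidx (by omega) (by omega) hdrop' (by rw [if_pos (by omega)]; exact ⟨by omega, rfl⟩)

-- ===== VERDICT =====
theorem solution_spec : Claim_equal_solution := by
  intro nice _
  unfold Spec_solution solution solution_alt
  rw [loopA_eq_reduce_build nice (nice.drop 1) 1 (-1) 0 (-1) (-1) (-1) 0 0 0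
    (by omega) (by omega) (by rfl) (by rw [if_neg (by omega)]; exact ⟨rfl, by omega⟩)]
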